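-- pv_equiv track=rewrite | github.com/Tkalisvaart/Threat-Intel-Map | scripts/fetch_iocs.py | map_malware_type
-- ===== SOURCE A (Python) =====
-- def map_malware_type(family):
--     f = (family or '').lower()
--     if any(x in f for x in (
--         # RATs / post-exploitation frameworks
--         'cobalt', 'asyncrat', 'remcos', 'njrat', 'plugx', 'quasar',
--         'darkcomet', 'nanocore', 'xworm', 'sliver', 'havoc', 'metasploit',
--         # Banking trojans / loaders — all C2-driven
--         'emotet', 'qakbot', 'qbot', 'icedid', 'dridex', 'trickbot',
--         'bazarloader', 'bumblebee', 'gootkit', 'ursnif', 'zloader',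
--         'amadey', 'systembc', 'pikabot', 'latrodectus',
--         # Info-stealers with C2 check-in
--         'stealc', 'redline', 'raccoon', 'lumma', 'vidar', 'formbook',
--         'agent tesla', 'lokibot', 'snake keylogger',
--     )):
--         return 'c2'
--     if any(x in f for x in (
--         'ransomware', 'lockbit', 'blackcat', 'clop', 'conti',
--         'revil', 'hive', 'sodinokibi', 'akira', 'phobos',
--         'blackbasta', 'rhysida', 'play', 'medusa',
--     )):
--         return 'exploit'
--     if 'phish' in f:
--         return 'phishing'
--     if any(x in f for x in ('scan', 'recon', 'masscan', 'zmap')):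
--         return 'recon'
--     if any(x in f for x in ('ddos', 'flood', 'mirai', 'bashlite', 'moobot')):
--         return 'ddos'
--     return 'malware'
-- ===== SOURCE B (Python) =====
-- # B: priority-minimum over a flat, alphabetically ordered keyword table.
-- # Each keyword carries its category's priority index; the answer is the category
-- # of the smallest priority among all keywords occurring in the string (default:
-- # 'malware'). Correct because A's cascade returns the first category, in priority
-- # order, with any matching keyword — exactly the minimum priority that matches.
--
-- _CATEGORIES = ('c2', 'exploit', 'phishing', 'recon', 'ddos', 'malware')
--
-- _KEYWORDS = (
--     ('agent tesla', 0), ('akira', 1), ('amadey', 0), ('asyncrat', 0),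
--     ('bashlite', 4), ('bazarloader', 0), ('blackbasta', 1), ('blackcat', 1),
--     ('bumblebee', 0), ('clop', 1), ('cobalt', 0), ('conti', 1),
--     ('darkcomet', 0), ('ddos', 4), ('dridex', 0), ('emotet', 0),
--     ('flood', 4), ('formbook', 0), ('gootkit', 0), ('havoc', 0),
--     ('hive', 1), ('icedid', 0), ('latrodectus', 0), ('lockbit', 1),
--     ('lokibot', 0), ('lumma', 0), ('masscan', 3), ('medusa', 1),
--     ('metasploit', 0), ('mirai', 4), ('moobot', 4), ('nanocore', 0),
--     ('njrat', 0), ('phish', 2), ('phobos', 1), ('pikabot', 0),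
--     ('play', 1), ('plugx', 0), ('qakbot', 0), ('qbot', 0),
--     ('quasar', 0), ('raccoon', 0), ('ransomware', 1), ('recon', 3),
--     ('redline', 0), ('remcos', 0), ('revil', 1), ('rhysida', 1),
--     ('scan', 3), ('sliver', 0), ('snake keylogger', 0), ('sodinokibi', 1),
--     ('stealc', 0), ('systembc', 0), ('trickbot', 0), ('ursnif', 0),
--     ('vidar', 0), ('xworm', 0), ('zloader', 0), ('zmap', 3),
-- )
--
--
-- def map_malware_type(family):
--     f = (family or '').lower()
--     best = min((g for kw, g in _KEYWORDS if kw in f), default=5)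
--     return _CATEGORIES[best]
-- ===== Notes on version B (the rewrite author's own statement) =====
-- stated objective: alternative
-- what changed: Replaces the five-branch first-match cascade over keyword groups by a priority-minimum: one flat, alphabetically ordered (keyword, priority) table is scanned once, the minimum priority among matching keywords is taken (default 5), and the category tuple is indexed with it.
import Mathlib
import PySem

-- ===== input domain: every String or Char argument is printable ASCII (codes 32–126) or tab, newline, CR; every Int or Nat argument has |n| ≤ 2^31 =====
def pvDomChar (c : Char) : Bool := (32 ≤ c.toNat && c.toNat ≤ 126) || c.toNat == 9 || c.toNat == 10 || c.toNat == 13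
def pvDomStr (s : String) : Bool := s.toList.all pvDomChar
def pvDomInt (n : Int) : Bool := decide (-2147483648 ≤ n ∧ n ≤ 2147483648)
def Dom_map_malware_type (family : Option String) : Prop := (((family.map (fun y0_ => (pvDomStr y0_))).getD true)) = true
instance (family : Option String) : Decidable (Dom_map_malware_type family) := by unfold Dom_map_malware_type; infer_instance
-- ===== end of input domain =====

-- B replaces A's ordered five-branch cascade by a priority-minimum: one flat,
-- alphabetically ordered keyword table tagged with category priorities, the answer
-- being the category of the smallest priority among all matching keywords (simpler
-- decomposition; same cost, same results).

-- ===== PORT A =====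
def map_malware_type (family : Option String) : String :=
  let f := PySem.Str.lower (family.getD "")   -- (family or '').lower(); '' or '' = ''
  if [ "cobalt", "asyncrat", "remcos", "njrat", "plugx", "quasar",
       "darkcomet", "nanocore", "xworm", "sliver", "havoc", "metasploit",
       "emotet", "qakbot", "qbot", "icedid", "dridex", "trickbot",
       "bazarloader", "bumblebee", "gootkit", "ursnif", "zloader",
       "amadey", "systembc", "pikabot", "latrodectus",
       "stealc", "redline", "raccoon", "lumma", "vidar", "formbook",
       "agent tesla", "lokibot", "snake keylogger" ].any (fun x => PySem.Str.isIn x f)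
  then "c2"
  else if [ "ransomware", "lockbit", "blackcat", "clop", "conti",
            "revil", "hive", "sodinokibi", "akira", "phobos",
            "blackbasta", "rhysida", "play", "medusa" ].any (fun x => PySem.Str.isIn x f)
  then "exploit"
  else if PySem.Str.isIn "phish" f then "phishing"
  else if [ "scan", "recon", "masscan", "zmap" ].any (fun x => PySem.Str.isIn x f)
  then "recon"
  else if [ "ddos", "flood", "mirai", "bashlite", "moobot" ].any (fun x => PySem.Str.isIn x f)
  then "ddos"
  else "malware"

-- ===== PORT B =====
def mmtCategories : List String := ["c2", "exploit", "phishing", "recon", "ddos", "malware"]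

-- the 60 keyword→priority pairs, in alphabetical order (Source B's _KEYWORDS)
def mmtKeywords : List (String × Int) :=
  [ ("agent tesla", 0), ("akira", 1), ("amadey", 0), ("asyncrat", 0),
    ("bashlite", 4), ("bazarloader", 0), ("blackbasta", 1), ("blackcat", 1),
    ("bumblebee", 0), ("clop", 1), ("cobalt", 0), ("conti", 1),
    ("darkcomet", 0), ("ddos", 4), ("dridex", 0), ("emotet", 0),
    ("flood", 4), ("formbook", 0), ("gootkit", 0), ("havoc", 0),
    ("hive", 1), ("icedid", 0), ("latrodectus", 0), ("lockbit", 1),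
    ("lokibot", 0), ("lumma", 0), ("masscan", 3), ("medusa", 1),
    ("metasploit", 0), ("mirai", 4), ("moobot", 4), ("nanocore", 0),
    ("njrat", 0), ("phish", 2), ("phobos", 1), ("pikabot", 0),
    ("play", 1), ("plugx", 0), ("qakbot", 0), ("qbot", 0),
    ("quasar", 0), ("raccoon", 0), ("ransomware", 1), ("recon", 3),
    ("redline", 0), ("remcos", 0), ("revil", 1), ("rhysida", 1),
    ("scan", 3), ("sliver", 0), ("snake keylogger", 0), ("sodinokibi", 1),
    ("stealc", 0), ("systembc", 0), ("trickbot", 0), ("ursnif", 0),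
    ("vidar", 0), ("xworm", 0), ("zloader", 0), ("zmap", 3) ]

def map_malware_type_alt (family : Option String) : String :=
  let f := PySem.Str.lower (family.getD "")
  -- min((g for kw, g in _KEYWORDS if kw in f), default=5)
  let best := PySem.List.minD
    (mmtKeywords.filterMap (fun p => if PySem.Str.isIn p.1 f then some p.2 else none))
    (fun g => g) 5
  PySem.List.pyGetD mmtCategories best ""   -- _CATEGORIES[best]; 0 ≤ best ≤ 5, always in range

-- ===== PRECONDITION & SPEC =====
def Spec_map_malware_type (family : Option String) (out : String) : Prop := out = map_malware_type_alt family
instance (family : Option String) (out : String) : Decidable (Spec_map_malware_type family out) := by unfold Spec_map_malware_type; infer_instance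

-- ===== CLAIM (what is proved, stated in full; the proofs are below) =====
def Claim_equal_map_malware_type : Prop := ∀ (family : Option String), Dom_map_malware_type family → Spec_map_malware_type family (map_malware_type family)

-- ===== LEMMAS AND PROOFS =====

-- the same 60 pairs regrouped in A's category order (proof-only)
def mmtGrouped (f : String) : List Int :=
  (([ "cobalt", "asyncrat", "remcos", "njrat", "plugx", "quasar",
      "darkcomet", "nanocore", "xworm", "sliver", "havoc", "metasploit",
      "emotet", "qakbot", "qbot", "icedid", "dridex", "trickbot",
      "bazarloader", "bumblebee", "gootkit", "ursnif", "zloader",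
      "amadey", "systembc", "pikabot", "latrodectus",
      "stealc", "redline", "raccoon", "lumma", "vidar", "formbook",
      "agent tesla", "lokibot", "snake keylogger" ].map (fun kw => (kw, (0:Int)))) ++
   ([ "ransomware", "lockbit", "blackcat", "clop", "conti",
      "revil", "hive", "sodinokibi", "akira", "phobos",
      "blackbasta", "rhysida", "play", "medusa" ].map (fun kw => (kw, (1:Int)))) ++
   ([ "phish" ].map (fun kw => (kw, (2:Int)))) ++
   ([ "scan", "recon", "masscan", "zmap" ].map (fun kw => (kw, (3:Int)))) ++
   ([ "ddos", "flood", "mirai", "bashlite", "moobot" ].map (fun kw => (kw, (4:Int))))).filterMap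
    (fun p => if PySem.Str.isIn p.1 f then some p.2 else none)

lemma mmt_perm (f : String) :
    (mmtKeywords.filterMap (fun p => if PySem.Str.isIn p.1 f then some p.2 else none)).Perm
      (mmtGrouped f) := by
  unfold mmtGrouped
  exact List.Perm.filterMap _ (by decide)

lemma tag_filterMap (kws : List String) (i : Int) (f : String) :
    ((kws.map (fun kw => (kw, i))).filterMap
        (fun p => if PySem.Str.isIn p.1 f then some p.2 else none))
      = List.replicate (kws.countP (fun kw => PySem.Str.isIn kw f)) i := by
  induction kws with
  | nil => rfl
  | cons k t ih =>
      rw [List.map_cons, List.filterMap_cons, List.countP_cons]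
      by_cases h : PySem.Str.isIn k f
      · rw [if_pos h, ih]
        simp only [PySem.Str.isIn] at h
        simp [h, List.replicate_succ]
      · rw [if_neg h, ih]
        simp only [PySem.Str.isIn] at h
        simp [h]

lemma foldl_min_replicate (a i : Int) (c : Nat) :
    List.foldl min a (List.replicate c i) = if c = 0 then a else min a i := by
  induction c generalizing a with
  | zero => rfl
  | succ c ih =>
      rw [List.replicate_succ, List.foldl_cons, ih]
      rw [if_neg (Nat.succ_ne_zero c)]
      split_ifs with h
      · rfl
      · rw [min_assoc, min_self]

lemma minD_eq_foldl (l : List Int) (h : ∀ x ∈ l, x ≤ 5) :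
    PySem.List.minD l (fun g => g) 5 = l.foldl min 5 := by
  cases l with
  | nil => rfl
  | cons x t =>
      have hx : min 5 x = x := min_eq_right (h x (by simp))
      simp [PySem.List.minD, PySem.List.min?_id_cons, hx]

lemma countP_zero_iff_any_false (l : List String) (p : String → Bool) :
    l.countP p = 0 ↔ l.any p = false := by
  simp [List.countP_eq_zero, List.any_eq_false]

-- ===== VERDICT (by name: the statement is the Claim_ definition above) =====
theorem map_malware_type_spec : Claim_equal_map_malware_type := by
  intro family _
  show map_malware_type family = map_malware_type_alt family
  simp only [map_malware_type, map_malware_type_alt]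
  generalize PySem.Str.lower (family.getD "") = f
  have hle : ∀ x ∈ mmtKeywords.filterMap
      (fun p => if PySem.Str.isIn p.1 f then some p.2 else none), x ≤ 5 := by
    intro x hx
    rcases List.mem_filterMap.mp hx with ⟨p, hp, hpx⟩
    have h2 : ∀ q ∈ mmtKeywords, q.2 ≤ 5 := by decide
    split_ifs at hpx with h
    exact Option.some.inj hpx ▸ h2 p hp
  rw [minD_eq_foldl _ hle,
      List.Perm.foldl_eq (f := min) (mmt_perm f) 5]
  unfold mmtGrouped
  rw [List.filterMap_append, List.filterMap_append, List.filterMap_append,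
      List.filterMap_append, tag_filterMap, tag_filterMap, tag_filterMap,
      tag_filterMap, tag_filterMap]
  rw [List.foldl_append, List.foldl_append, List.foldl_append, List.foldl_append]
  rw [foldl_min_replicate, foldl_min_replicate, foldl_min_replicate,
      foldl_min_replicate, foldl_min_replicate]
  simp only [countP_zero_iff_any_false]
  have hphish : ([ "phish" ].any (fun kw => PySem.Str.isIn kw f)) = PySem.Str.isIn "phish" f := by
    simp
  by_cases h0 : ([ "cobalt", "asyncrat", "remcos", "njrat", "plugx", "quasar",
       "darkcomet", "nanocore", "xworm", "sliver", "havoc", "metasploit",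
       "emotet", "qakbot", "qbot", "icedid", "dridex", "trickbot",
       "bazarloader", "bumblebee", "gootkit", "ursnif", "zloader",
       "amadey", "systembc", "pikabot", "latrodectus",
       "stealc", "redline", "raccoon", "lumma", "vidar", "formbook",
       "agent tesla", "lokibot", "snake keylogger" ].any (fun kw => PySem.Str.isIn kw f)) = true <;>
  by_cases h1 : ([ "ransomware", "lockbit", "blackcat", "clop", "conti",
            "revil", "hive", "sodinokibi", "akira", "phobos",
            "blackbasta", "rhysida", "play", "medusa" ].any (fun kw => PySem.Str.isIn kw f)) = true <;>
  by_cases h2 : PySem.Str.isIn "phish" f = true <;>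
  by_cases h3 : ([ "scan", "recon", "masscan", "zmap" ].any (fun kw => PySem.Str.isIn kw f)) = true <;>
  by_cases h4 : ([ "ddos", "flood", "mirai", "bashlite", "moobot" ].any (fun kw => PySem.Str.isIn kw f)) = true <;>
  simp only [Bool.not_eq_true] at * <;>
  simp only [h0, h1, h2, h3, h4, hphish] <;>
  decide
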